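-- pv_equiv track=rewrite | github.com/ArtemPasechnyi/python_pr_Ym_252_1term | pr8/1/task1.py | find_multiples_and_max
-- ===== SOURCE A (Python) =====
-- from typing import List, Optional, Tuple
--
-- def find_multiples_and_max(matrix: List[List[int]], k: int) -> Tuple[int, Optional[int]]:
--     """Находит количество элементов, кратных k, и наибольший из них."""
--     multiples = []
--     for row in matrix:
--         for element in row:
--             if element % k == 0:
--                 multiples.append(element)
--
--     count = len(multiples)
--     max_element = max(multiples) if multiples else None
--     return count, max_element
-- ===== SOURCE B (Python) =====
-- def find_multiples_and_max(matrix, k):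
--     count = sum(element % k == 0 for row in matrix for element in row)
--     if count:
--         return count, max(element for row in matrix for element in row if element % k == 0)
--     return count, None
-- ===== Notes on version B (the rewrite author's own statement) =====
-- stated objective: alternative
-- what changed: B drops the materialised multiples list and its len/max calls: a first counting pass sums booleans over the matrix, and only if the count is nonzero a second generator pass computes the maximum directly.
import Mathlib
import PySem

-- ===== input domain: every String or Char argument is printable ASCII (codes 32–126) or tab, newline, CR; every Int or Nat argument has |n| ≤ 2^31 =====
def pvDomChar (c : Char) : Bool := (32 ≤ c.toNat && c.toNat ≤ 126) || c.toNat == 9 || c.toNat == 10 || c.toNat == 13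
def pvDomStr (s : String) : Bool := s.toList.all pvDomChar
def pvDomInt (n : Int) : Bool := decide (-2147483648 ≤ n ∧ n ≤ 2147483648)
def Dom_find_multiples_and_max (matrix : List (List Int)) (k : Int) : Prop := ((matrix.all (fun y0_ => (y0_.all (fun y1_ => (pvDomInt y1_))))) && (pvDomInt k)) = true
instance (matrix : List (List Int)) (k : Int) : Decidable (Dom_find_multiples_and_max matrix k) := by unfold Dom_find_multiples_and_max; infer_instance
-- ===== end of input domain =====

-- B replaces A's materialised multiples list (and its len/max calls) by staged passes: a counting
-- pass summing booleans, then — only when the count is nonzero — a second pass taking the maximum.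

-- ===== PORT A =====
def find_multiples_and_max (matrix : List (List Int)) (k : Int) : Int × Option Int :=
  let multiples := matrix.foldl (fun acc row =>
    row.foldl (fun acc e => if PySem.Int.mod e k = 0 then acc ++ [e] else acc) acc) []
  (multiples.length, PySem.List.max? multiples (fun x => x))

-- ===== PORT B =====
def find_multiples_and_max_alt (matrix : List (List Int)) (k : Int) : Int × Option Int :=
  let count : Int := matrix.foldl (fun c row =>
    row.foldl (fun c e => c + (if PySem.Int.mod e k = 0 then 1 else 0)) c) 0
  if count ≠ 0 then
    -- max(generator): the filtered elements in matrix order, then Python's max (guarded nonempty)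
    (count, PySem.List.max? (matrix.foldl (fun a row =>
      row.foldl (fun a e => if PySem.Int.mod e k = 0 then a ++ [e] else a) a) []) (fun x => x))
  else (count, none)

-- ===== PRECONDITION & SPEC =====
-- Pre_ excludes exactly the inputs where Python A raises ZeroDivisionError: k = 0 with at least one element present.
def Pre_find_multiples_and_max (matrix : List (List Int)) (k : Int) : Prop :=
  k ≠ 0 ∨ ∀ row ∈ matrix, row = []
instance (matrix : List (List Int)) (k : Int) : Decidable (Pre_find_multiples_and_max matrix k) := by unfold Pre_find_multiples_and_max; infer_instance
def pvWitness_find_multiples_and_max : List (List Int) × Int := ([[1, 2], [3, 4]], 2)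
def Spec_find_multiples_and_max (matrix : List (List Int)) (k : Int) (out : Int × Option Int) : Prop := out = find_multiples_and_max_alt matrix k
instance (matrix : List (List Int)) (k : Int) (out : Int × Option Int) : Decidable (Spec_find_multiples_and_max matrix k out) := by unfold Spec_find_multiples_and_max; infer_instance

-- ===== CLAIM (what is proved, stated in full; the proofs are below) =====
def Claim_equal_find_multiples_and_max : Prop := ∀ (matrix : List (List Int)) (k : Int), Dom_find_multiples_and_max matrix k → Pre_find_multiples_and_max matrix k → Spec_find_multiples_and_max matrix k (find_multiples_and_max matrix k)

-- ===== LEMMAS AND PROOFS =====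

-- B's counting fold over one row, started from acc.length, tracks the length of A's append fold
lemma cnt_row (k : Int) (l : List Int) (acc : List Int) :
    l.foldl (fun c e => c + (if PySem.Int.mod e k = 0 then 1 else 0)) ((acc.length : Int)) =
      (((l.foldl (fun a e => if PySem.Int.mod e k = 0 then a ++ [e] else a) acc).length : Int)) := by
  induction l generalizing acc with
  | nil => rfl
  | cons e t ih =>
      simp only [List.foldl]
      by_cases h : PySem.Int.mod e k = 0
      · rw [if_pos h, if_pos h]
        have hlen : ((acc.length : Int) + 1) = (((acc ++ [e]).length : Int)) := by simp
        rw [hlen]; exact ih (acc ++ [e])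
      · rw [if_neg h, if_neg h, add_zero]; exact ih acc

-- the same invariant over the whole matrix
lemma cnt_matrix (k : Int) (matrix : List (List Int)) (acc : List Int) :
    matrix.foldl (fun c row => row.foldl (fun c e => c + (if PySem.Int.mod e k = 0 then 1 else 0)) c)
        ((acc.length : Int)) =
      (((matrix.foldl (fun a row => row.foldl (fun a e => if PySem.Int.mod e k = 0 then a ++ [e] else a) a) acc).length : Int)) := by
  induction matrix generalizing acc with
  | nil => rfl
  | cons row rest ih =>
      simp only [List.foldl]
      rw [cnt_row, ih]

-- ===== VERDICT (by name: the statement is the Claim_ definition above) =====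
theorem find_multiples_and_max_spec : Claim_equal_find_multiples_and_max := by
  intro matrix k _ _
  unfold Spec_find_multiples_and_max find_multiples_and_max find_multiples_and_max_alt
  have h := cnt_matrix k matrix []
  simp only [List.length_nil, Int.natCast_zero] at h
  rw [h]
  set ms := matrix.foldl (fun a row => row.foldl (fun a e => if PySem.Int.mod e k = 0 then a ++ [e] else a) a) [] with hms
  by_cases hz : (ms.length : Int) ≠ 0
  · rw [if_pos hz]
  · rw [if_neg hz]
    rw [not_not] at hz
    have : ms = [] := List.eq_nil_of_length_eq_zero (by exact_mod_cast hz)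
    simp [this, PySem.List.max?]
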